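-- pv_equiv track=rewrite | github.com/cooperxxjohn-svg/xboq | src/analysis/pipeline_helpers.py | _detect_epc_mode
-- ===== SOURCE A (Python) =====
-- def _detect_epc_mode(boq_items: list) -> bool:
--     """Detect EPC/Turnkey contracts from BOQ structure.
--
--     Signal: all priceable BOQ items are lump-sum (unit=LS/LUMP) AND item count is ≤5.
--     """
--     if not boq_items:
--         return False
--     data_items = [
--         it for it in boq_items
--         if (it.get("description") or "").strip()
--         and len((it.get("description") or "").strip()) > 5
--     ]
--     if not data_items:
--         return False
--     ls_units = {"LS", "LUMP", "L.S", "L.S.", "JOB", "LOT", "LUMP SUM", "LUMPSUM"}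
--     ls_items = [
--         it for it in data_items
--         if (it.get("unit") or "").strip().upper() in ls_units
--         or "lump sum" in (it.get("description") or "").lower()
--         or "complete works" in (it.get("description") or "").lower()
--     ]
--     return len(ls_items) >= max(1, len(data_items)) and len(data_items) <= 5
-- ===== SOURCE B (Python) =====
-- def _detect_epc_mode(boq_items: list) -> bool:
--     ls_units = {"LS", "LUMP", "L.S", "L.S.", "JOB", "LOT", "LUMP SUM", "LUMPSUM"}
--     data_count = 0
--     for it in boq_items:
--         desc = (it.get("description") or "").strip()
--         if len(desc) <= 5:
--             continue  # not a data item
--         low = (it.get("description") or "").lower()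
--         if ((it.get("unit") or "").strip().upper() not in ls_units
--                 and "lump sum" not in low
--                 and "complete works" not in low):
--             return False  # a data item that is not lump-sum
--         if data_count == 5:
--             return False  # more than 5 data items
--         data_count += 1
--     return data_count >= 1
-- ===== Notes on version B (the rewrite author's own statement) =====
-- stated objective: alternative
-- what changed: Replaces the two materialized filter passes (data_items, ls_items) and the max(1,len)-length comparison by a single short-circuiting loop that keeps only a data-item counter and returns False as soon as a non-lump-sum data item or a sixth data item is seen.
import Mathlib
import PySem

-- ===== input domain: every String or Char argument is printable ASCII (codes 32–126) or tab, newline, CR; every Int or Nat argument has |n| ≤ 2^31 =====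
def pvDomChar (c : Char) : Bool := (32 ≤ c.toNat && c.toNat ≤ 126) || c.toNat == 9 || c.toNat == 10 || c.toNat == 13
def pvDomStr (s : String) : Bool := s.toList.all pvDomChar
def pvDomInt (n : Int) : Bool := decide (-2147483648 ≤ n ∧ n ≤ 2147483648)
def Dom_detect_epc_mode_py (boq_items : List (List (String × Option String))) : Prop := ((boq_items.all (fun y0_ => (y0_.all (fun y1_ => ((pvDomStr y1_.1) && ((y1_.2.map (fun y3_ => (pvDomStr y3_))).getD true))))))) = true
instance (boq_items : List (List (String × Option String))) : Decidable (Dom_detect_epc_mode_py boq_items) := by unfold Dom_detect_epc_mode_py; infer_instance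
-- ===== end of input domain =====

-- B replaces A's two materialized filter passes and max(1,len) comparison by one
-- short-circuiting loop keeping a data-item counter (objective: alternative decomposition).

-- ===== PORT A =====
-- (it.get(k) or "") : missing key or None (or "") gives ""
def pvGetStr (it : List (String × Option String)) (k : String) : String :=
  ((it.lookup k).bind id).getD ""

def pvLsUnits : List String :=
  ["LS", "LUMP", "L.S", "L.S.", "JOB", "LOT", "LUMP SUM", "LUMPSUM"]

-- comprehension filter for data_items
def pvIsDataA (it : List (String × Option String)) : Bool :=
  !(PySem.Str.strip (pvGetStr it "description") == "")
    && decide (5 < PySem.Str.len (PySem.Str.strip (pvGetStr it "description")))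

-- comprehension filter for ls_items
def pvIsLsA (it : List (String × Option String)) : Bool :=
  pvLsUnits.contains (PySem.Str.upper (PySem.Str.strip (pvGetStr it "unit")))
    || PySem.Str.isIn "lump sum" (PySem.Str.lower (pvGetStr it "description"))
    || PySem.Str.isIn "complete works" (PySem.Str.lower (pvGetStr it "description"))

def detect_epc_mode_py (boq_items : List (List (String × Option String))) : Bool :=
  if boq_items = [] then false
  else
    let data_items := boq_items.filter pvIsDataA
    if data_items = [] then false
    else
      let ls_items := data_items.filter pvIsLsA
      decide (ls_items.length ≥ max 1 data_items.length) && decide (data_items.length ≤ 5)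

-- ===== PORT B =====
-- the single loop of Source B, carrying the data-item counter
def pvGoB (items : List (List (String × Option String))) (data_count : Nat) : Bool :=
  match items with
  | [] => decide (data_count ≥ 1)
  | it :: rest =>
    let desc := PySem.Str.strip (pvGetStr it "description")
    if PySem.Str.len desc ≤ 5 then pvGoB rest data_count
    else
      let low := PySem.Str.lower (pvGetStr it "description")
      if !(pvLsUnits.contains (PySem.Str.upper (PySem.Str.strip (pvGetStr it "unit"))))
          && !(PySem.Str.isIn "lump sum" low) && !(PySem.Str.isIn "complete works" low) then
        false
      else if data_count = 5 then false
      else pvGoB rest (data_count + 1)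

def detect_epc_mode_py_alt (boq_items : List (List (String × Option String))) : Bool :=
  pvGoB boq_items 0

-- ===== PRECONDITION & SPEC =====
def Spec_detect_epc_mode_py (boq_items : List (List (String × Option String))) (out : Bool) : Prop := out = detect_epc_mode_py_alt boq_items
instance (boq_items : List (List (String × Option String))) (out : Bool) : Decidable (Spec_detect_epc_mode_py boq_items out) := by unfold Spec_detect_epc_mode_py; infer_instance

-- ===== CLAIM (what is proved, stated in full; the proofs are below) =====
def Claim_equal_detect_epc_mode_py : Prop := ∀ (boq_items : List (List (String × Option String))), Dom_detect_epc_mode_py boq_items → Spec_detect_epc_mode_py boq_items (detect_epc_mode_py boq_items)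

-- ===== LEMMAS AND PROOFS =====

-- B's skip test (len <= 5) is the negation of A's data-item test
lemma isDataA_iff (it : List (String × Option String)) :
    pvIsDataA it = true ↔ 5 < PySem.Str.len (PySem.Str.strip (pvGetStr it "description")) := by
  unfold pvIsDataA
  constructor
  · intro h
    simp only [Bool.and_eq_true, decide_eq_true_eq] at h
    exact h.2
  · intro h
    simp only [Bool.and_eq_true, decide_eq_true_eq, Bool.not_eq_true', beq_eq_false_iff_ne]
    refine ⟨?_, h⟩
    intro hEq
    rw [hEq] at h
    simp [PySem.Str.len] at h

-- B's non-ls early-exit test is the negation of A's ls test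
lemma lsB_not (it : List (String × Option String)) :
    (!(pvLsUnits.contains (PySem.Str.upper (PySem.Str.strip (pvGetStr it "unit"))))
      && !(PySem.Str.isIn "lump sum" (PySem.Str.lower (pvGetStr it "description")))
      && !(PySem.Str.isIn "complete works" (PySem.Str.lower (pvGetStr it "description"))))
      = !(pvIsLsA it) := by
  unfold pvIsLsA
  cases pvLsUnits.contains (PySem.Str.upper (PySem.Str.strip (pvGetStr it "unit"))) <;>
    cases PySem.Str.isIn "lump sum" (PySem.Str.lower (pvGetStr it "description")) <;>
    cases PySem.Str.isIn "complete works" (PySem.Str.lower (pvGetStr it "description")) <;> simp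

-- characterization of B's loop
lemma goB_eq (items : List (List (String × Option String))) (k : Nat) (hk : k ≤ 5) :
    pvGoB items k =
      ((items.filter pvIsDataA).all pvIsLsA
        && decide (1 ≤ k + (items.filter pvIsDataA).length)
        && decide (k + (items.filter pvIsDataA).length ≤ 5)) := by
  induction items generalizing k with
  | nil => simp [pvGoB]; omega
  | cons it rest ih =>
    by_cases hd : pvIsDataA it = true
    · have hlen : ¬ (PySem.Str.len (PySem.Str.strip (pvGetStr it "description")) ≤ 5) := by
        have := (isDataA_iff it).mp hd
        omega
      by_cases hls : pvIsLsA it = true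
      · have hnb := lsB_not it
        rw [hls] at hnb
        by_cases h5 : k = 5
        · subst h5
          simp only [pvGoB, hlen, if_false, hnb, Bool.not_true, Bool.false_eq_true, if_true]
          simp [hd, hls]
        · have hk' : k + 1 ≤ 5 := by omega
          simp only [pvGoB, hlen, if_false, hnb, Bool.not_true, Bool.false_eq_true, h5]
          rw [ih (k + 1) hk']
          have h1 : k + 1 + (List.filter pvIsDataA rest).length
              = k + ((List.filter pvIsDataA rest).length + 1) := by omega
          simp [hd, hls, h1]
      · have hnb := lsB_not it
        rw [Bool.eq_false_iff.mpr hls] at hnb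
        simp only [pvGoB, hlen, if_false, hnb, Bool.not_false, if_true]
        simp [hd, hls]
    · have hlen : PySem.Str.len (PySem.Str.strip (pvGetStr it "description")) ≤ 5 := by
        by_contra h
        exact hd ((isDataA_iff it).mpr (by omega))
      simp only [pvGoB, hlen, if_true]
      rw [ih k hk]
      simp [hd]

-- characterization of A
lemma a_eq (boq_items : List (List (String × Option String))) :
    detect_epc_mode_py boq_items =
      ((boq_items.filter pvIsDataA).all pvIsLsA
        && decide (1 ≤ 0 + (boq_items.filter pvIsDataA).length)
        && decide (0 + (boq_items.filter pvIsDataA).length ≤ 5)) := by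
  unfold detect_epc_mode_py
  by_cases h0 : boq_items = []
  · subst h0; simp
  · simp only [h0, if_false]
    set data := boq_items.filter pvIsDataA with hdata
    by_cases hd : data = []
    · simp [hd]
    · simp only [hd, if_false]
      have hpos : 0 < data.length := List.length_pos_iff.mpr hd
      have hmax : max 1 data.length = data.length := by omega
      rw [hmax]
      have hle : (data.filter pvIsLsA).length ≤ data.length := List.length_filter_le _ _
      by_cases hall : data.all pvIsLsA = true
      · have : (data.filter pvIsLsA).length = data.length := by
          rw [List.length_filter_eq_length_iff]
          intro a ha
          exact List.all_eq_true.mp hall a ha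
        simp [this, hall]
        omega
      · have hlt : (data.filter pvIsLsA).length < data.length := by
          rcases Nat.lt_or_ge (data.filter pvIsLsA).length data.length with h | h
          · exact h
          · have heq : (data.filter pvIsLsA).length = data.length := le_antisymm hle h
            have : ∀ a ∈ data, pvIsLsA a := List.length_filter_eq_length_iff.mp heq
            exact absurd (List.all_eq_true.mpr fun a ha => this a ha) hall
        simp [hall]
        omega

-- ===== VERDICT (by name: the statement is the Claim_ definition above) =====
theorem detect_epc_mode_py_spec : Claim_equal_detect_epc_mode_py := by
  intro boq_items _
  unfold Spec_detect_epc_mode_py detect_epc_mode_py_alt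
  rw [a_eq, goB_eq boq_items 0 (by omega)]
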